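-- pv_equiv track=rewrite | github.com/stshryu/advent_of_code | 2024/2/3.py | aord
-- ===== SOURCE A (Python) =====
-- def aord(level, r=None):
--     if level == sorted(level):
--         return (True, [])
--     elif level == sorted(level, reverse=True):
--         return (True, [])
--     else:
--         if r: return (False, [])
--         temp = []
--         for i in range(len(level)):
--             x = level[:i] + level[i+1:]
--             if x == sorted(x):
--                 temp.append(i)
--             if x == sorted(x, reverse=True):
--                 temp.append(i)
--         return (True, temp) if temp else (False, [])
-- ===== SOURCE B (Python) =====
-- def _pref(xs, rel):
--     # flags[k] is True iff the first k elements of xs form a rel-chain; len(flags) == len(xs) + 1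
--     flags = [True]
--     ok = True
--     for j, v in enumerate(xs):
--         if j > 0:
--             ok = ok and rel(xs[j - 1], v)
--         flags.append(ok)
--     return flags
--
--
-- def aord(level, r=None):
--     n = len(level)
--     le = lambda a, b: a <= b
--     ge = lambda a, b: a >= b
--     asc_pref = _pref(level, le)
--     desc_pref = _pref(level, ge)
--     rev = level[::-1]
--     asc_suf = _pref(rev, ge)[::-1]   # asc_suf[k]: level[k:] is nondecreasing
--     desc_suf = _pref(rev, le)[::-1]  # desc_suf[k]: level[k:] is nonincreasing
--     if asc_pref[n] or desc_pref[n]: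
--         return (True, [])
--     if r:
--         return (False, [])
--     temp = []
--     for i in range(n):
--         near = i == 0 or i == n - 1
--         if asc_pref[i] and asc_suf[i + 1] and (near or level[i - 1] <= level[i + 1]):
--             temp.append(i)
--         if desc_pref[i] and desc_suf[i + 1] and (near or level[i - 1] >= level[i + 1]):
--             temp.append(i)
--     return (True, temp) if temp else (False, [])
-- ===== Notes on version B (the rewrite author's own statement) =====
-- stated objective: faster
-- what changed: Instead of re-sorting every length-(n-1) removal sublist, B builds prefix/suffix monotone-run flag arrays once and decides each index's removal with an O(1) check (flags plus one boundary comparison).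
import Mathlib
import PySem

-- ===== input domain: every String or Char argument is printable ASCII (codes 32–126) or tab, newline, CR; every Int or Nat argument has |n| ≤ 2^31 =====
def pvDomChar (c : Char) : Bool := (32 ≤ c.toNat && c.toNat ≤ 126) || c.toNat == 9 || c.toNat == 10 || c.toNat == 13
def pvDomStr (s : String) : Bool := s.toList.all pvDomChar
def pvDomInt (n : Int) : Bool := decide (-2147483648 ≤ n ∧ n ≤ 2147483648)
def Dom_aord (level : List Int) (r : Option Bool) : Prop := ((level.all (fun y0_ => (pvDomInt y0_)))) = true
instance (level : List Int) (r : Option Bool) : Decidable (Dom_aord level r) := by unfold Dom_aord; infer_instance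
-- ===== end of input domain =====

-- B replaces A's per-index resort of the n removal sublists by prefix/suffix monotone-run
-- flag arrays with an O(1) check per index (objective: faster, O(n^2 log n) -> O(n)).
-- ===== PORT A =====
def aord (level : List Int) (r : Option Bool) : Bool × List Int :=
  if level = PySem.List.sorted level (fun x => x) false then (true, [])
  else if level = PySem.List.sorted level (fun x => x) true then (true, [])
  else if r.getD false then (false, [])
  else
    let temp := (PySem.List.pyRange 0 (level.length : Int) 1).foldl
      (fun temp i =>
        let x := PySem.List.slice level none (some i) ++ PySem.List.slice level (some (i+1)) none
        let temp := if x = PySem.List.sorted x (fun v => v) false then temp ++ [i] else temp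
        if x = PySem.List.sorted x (fun v => v) true then temp ++ [i] else temp) []
    if temp = [] then (false, []) else (true, temp)

-- ===== PORT B =====
-- Source B's helper _pref: running chain flags; flags[k] = first k elements form a rel-chain
def prefAux (rel : Int → Int → Bool) (prev : Int) (ok : Bool) : List Int → List Bool
  | [] => []
  | v :: t => (ok && rel prev v) :: prefAux rel v (ok && rel prev v) t

def prefFlags (rel : Int → Int → Bool) : List Int → List Bool
  | [] => [true]
  | v :: t => true :: true :: prefAux rel v true t

def aord_alt (level : List Int) (r : Option Bool) : Bool × List Int :=
  let n := level.length
  let ascPref := prefFlags (fun a b => decide (a ≤ b)) level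
  let descPref := prefFlags (fun a b => decide (b ≤ a)) level
  let rev := level.reverse
  let ascSuf := (prefFlags (fun a b => decide (b ≤ a)) rev).reverse
  let descSuf := (prefFlags (fun a b => decide (a ≤ b)) rev).reverse
  if ascPref.getD n true || descPref.getD n true then (true, [])
  else if r.getD false then (false, [])
  else
    let temp := (List.range n).foldl
      (fun temp i =>
        let near := i == 0 || i == n - 1
        let temp := if ascPref.getD i true && ascSuf.getD (i+1) true &&
            (near || decide (level.getD (i-1) 0 ≤ level.getD (i+1) 0)) then temp ++ [(i : Int)] else temp
        if descPref.getD i true && descSuf.getD (i+1) true &&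
            (near || decide (level.getD (i+1) 0 ≤ level.getD (i-1) 0)) then temp ++ [(i : Int)] else temp) []
    if temp = [] then (false, []) else (true, temp)

-- ===== PRECONDITION & SPEC =====
def Spec_aord (level : List Int) (r : Option Bool) (out : Bool × List Int) : Prop := out = aord_alt level r
instance (level : List Int) (r : Option Bool) (out : Bool × List Int) : Decidable (Spec_aord level r out) := by unfold Spec_aord; infer_instance

-- ===== CLAIM (what is proved, stated in full; the proofs are below) =====
def Claim_equal_aord : Prop := ∀ (level : List Int) (r : Option Bool), Dom_aord level r → Spec_aord level r (aord level r)

-- ===== LEMMAS AND PROOFS =====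
theorem eq_sorted_iff (xs : List Int) :
    xs = PySem.List.sorted xs (fun x => x) false ↔ xs.IsChain (· ≤ ·) := by
  rw [List.isChain_iff_pairwise]
  constructor
  · intro h
    have := PySem.List.sorted_pairwise (xs := xs) (key := fun x => x)
    rw [← h] at this
    simpa using this
  · intro h
    exact (PySem.List.sorted_eq_self_of_pairwise _ _ (by simpa using h)).symm

theorem eq_sorted_rev_iff (xs : List Int) :
    xs = PySem.List.sorted xs (fun x => x) true ↔ xs.IsChain (fun a b => b ≤ a) := by
  haveI : Trans (fun a b : Int => b ≤ a) (fun a b : Int => b ≤ a) (fun a b : Int => b ≤ a) :=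
    ⟨fun h1 h2 => le_trans h2 h1⟩
  rw [List.isChain_iff_pairwise]
  constructor
  · intro h
    have := PySem.List.sorted_pairwise_rev (xs := xs) (key := fun x => x)
    rw [← h] at this
    simpa using this
  · intro h
    exact (PySem.List.sorted_rev_eq_self_of_pairwise _ _ (by simpa using h)).symm

theorem length_prefAux (rel : Int → Int → Bool) (prev : Int) (ok : Bool) (t : List Int) :
    (prefAux rel prev ok t).length = t.length := by
  induction t generalizing prev ok with
  | nil => rfl
  | cons v t ih => simp [prefAux, ih]

theorem length_prefFlags (rel : Int → Int → Bool) (xs : List Int) :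
    (prefFlags rel xs).length = xs.length + 1 := by
  cases xs with
  | nil => rfl
  | cons v t => simp [prefFlags, length_prefAux]

theorem prefAux_getD (rel : Int → Int → Bool) (prev : Int) (ok : Bool) (t : List Int) (k : Nat)
    (hk : k < t.length) :
    ((prefAux rel prev ok t).getD k true = true) ↔
      (ok = true ∧ (prev :: t.take (k+1)).IsChain (fun a b => rel a b = true)) := by
  induction t generalizing prev ok k with
  | nil => simp at hk
  | cons v t ih =>
    cases k with
    | zero =>
      simp [prefAux, Bool.and_eq_true]
    | succ k =>
      simp only [prefAux, List.getD_cons_succ]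
      rw [ih _ _ _ (by simpa using hk)]
      simp only [List.take_succ_cons, List.isChain_cons_cons, Bool.and_eq_true]
      tauto

theorem prefFlags_getD (rel : Int → Int → Bool) (xs : List Int) (k : Nat) (hk : k ≤ xs.length) :
    ((prefFlags rel xs).getD k true = true) ↔ (xs.take k).IsChain (fun a b => rel a b = true) := by
  cases xs with
  | nil =>
    have : k = 0 := Nat.le_zero.mp hk
    subst this; simp [prefFlags]
  | cons v t =>
    match k with
    | 0 => simp [prefFlags]
    | 1 => simp [prefFlags]
    | (j+2) =>
      simp only [prefFlags, List.getD_cons_succ]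
      rw [prefAux_getD _ _ _ _ _ (by simpa using hk)]
      simp [List.take_succ_cons]

theorem sufFlags_getD (rel : Int → Int → Bool) (xs : List Int) (k : Nat) (hk : k ≤ xs.length) :
    (((prefFlags (fun a b => rel b a) xs.reverse).reverse).getD k true = true) ↔
      (xs.drop k).IsChain (fun a b => rel a b = true) := by
  have hlen : (prefFlags (fun a b => rel b a) xs.reverse).length = xs.length + 1 := by
    rw [length_prefFlags, List.length_reverse]
  have hk' : k < (prefFlags (fun a b => rel b a) xs.reverse).reverse.length := by
    simp [hlen]; omega
  rw [List.getD_eq_getElem _ _ hk', List.getElem_reverse]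
  have h1 : (prefFlags (fun a b => rel b a) xs.reverse).length - 1 - k = xs.length - k := by
    omega
  simp only [h1]
  rw [← List.getD_eq_getElem _ true (by omega),
    prefFlags_getD _ _ _ (by simp)]
  rw [List.take_reverse, List.isChain_reverse]
  have h2 : xs.length - (xs.length - k) = k := by omega
  rw [h2]

theorem isChain_removed (R : Int → Int → Prop) (xs : List Int) (k : Nat) (hk : k < xs.length) :
    (xs.take k ++ xs.drop (k+1)).IsChain R ↔
      ((xs.take k).IsChain R ∧ (xs.drop (k+1)).IsChain R ∧
        (k = 0 ∨ k = xs.length - 1 ∨ R (xs.getD (k-1) 0) (xs.getD (k+1) 0))) := by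
  rw [List.isChain_append]
  refine and_congr_right fun _ => and_congr_right fun _ => ?_
  by_cases hk0 : k = 0
  · subst hk0; simp
  · by_cases hk1 : k = xs.length - 1
    · have hd : xs.drop (k+1) = [] := List.drop_eq_nil_of_le (by omega)
      rw [hd]
      simp [hk1]
    · have hkk : 1 ≤ k ∧ k + 1 < xs.length := by omega
      have ht : (xs.take k).getLast? = some (xs.getD (k-1) 0) := by
        rw [List.getLast?_eq_getElem?]
        have hlen : (xs.take k).length = k := by simp; omega
        rw [hlen, List.getElem?_take_of_lt (by omega), List.getElem?_eq_getElem (by omega),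
          List.getD_eq_getElem _ _ (by omega)]
      have hh : (xs.drop (k+1)).head? = some (xs.getD (k+1) 0) := by
        rw [List.head?_drop, List.getElem?_eq_getElem (by omega),
          List.getD_eq_getElem _ _ (by omega)]
      simp [ht, hh, hk0, hk1]

theorem condB_iff (rel : Int → Int → Bool) (level : List Int) (k : Nat) (hk : k < level.length) :
    (((prefFlags rel level).getD k true &&
      ((prefFlags (fun a b => rel b a) level.reverse).reverse.getD (k+1) true) &&
      ((k == 0 || k == level.length - 1) || rel (level.getD (k-1) 0) (level.getD (k+1) 0))) = true)
    ↔ (level.take k ++ level.drop (k+1)).IsChain (fun a b => rel a b = true) := by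
  rw [isChain_removed _ _ _ hk]
  simp only [Bool.and_eq_true, Bool.or_eq_true, beq_iff_eq]
  rw [sufFlags_getD rel level (k+1) (by omega), prefFlags_getD _ _ _ (le_of_lt hk)]
  tauto

theorem chain_le_iff_flag (level : List Int) :
    level.IsChain (· ≤ ·) ↔
      ((prefFlags (fun a b => decide (a ≤ b)) level).getD level.length true = true) := by
  rw [prefFlags_getD _ _ _ (le_refl _), List.take_length]
  exact List.IsChain.iff (fun a b => (decide_eq_true_iff).symm)

theorem chain_ge_iff_flag (level : List Int) :
    level.IsChain (fun a b => b ≤ a) ↔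
      ((prefFlags (fun a b => decide (b ≤ a)) level).getD level.length true = true) := by
  rw [prefFlags_getD _ _ _ (le_refl _), List.take_length]
  exact List.IsChain.iff (fun a b => (decide_eq_true_iff).symm)

-- ===== VERDICT (by name: the statement is the Claim_ definition above) =====
theorem aord_spec : Claim_equal_aord := by
  intro level r _
  unfold Spec_aord aord aord_alt
  simp only []
  by_cases h1 : level = PySem.List.sorted level (fun x => x) false
  · rw [if_pos h1]
    have b1 := (chain_le_iff_flag level).mp ((eq_sorted_iff level).mp h1)
    rw [if_pos (show ((prefFlags (fun a b => decide (a ≤ b)) level).getD level.length true ||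
      (prefFlags (fun a b => decide (b ≤ a)) level).getD level.length true) = true from by
        rw [Bool.or_eq_true]; exact Or.inl b1)]
  · by_cases h2 : level = PySem.List.sorted level (fun x => x) true
    · rw [if_neg h1, if_pos h2]
      have b2 := (chain_ge_iff_flag level).mp ((eq_sorted_rev_iff level).mp h2)
      rw [if_pos (show ((prefFlags (fun a b => decide (a ≤ b)) level).getD level.length true ||
        (prefFlags (fun a b => decide (b ≤ a)) level).getD level.length true) = true from by
          rw [Bool.or_eq_true]; exact Or.inr b2)]
    · rw [if_neg h1, if_neg h2]
      have b1 : (prefFlags (fun a b => decide (a ≤ b)) level).getD level.length true = false := by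
        cases hc : (prefFlags (fun a b => decide (a ≤ b)) level).getD level.length true
        · rfl
        · exact absurd ((eq_sorted_iff level).mpr ((chain_le_iff_flag level).mpr hc)) h1
      have b2 : (prefFlags (fun a b => decide (b ≤ a)) level).getD level.length true = false := by
        cases hc : (prefFlags (fun a b => decide (b ≤ a)) level).getD level.length true
        · rfl
        · exact absurd ((eq_sorted_rev_iff level).mpr ((chain_ge_iff_flag level).mpr hc)) h2
      have hor : ¬ (((prefFlags (fun a b => decide (a ≤ b)) level).getD level.length true ||
          (prefFlags (fun a b => decide (b ≤ a)) level).getD level.length true) = true) := by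
        rw [b1, b2]; simp
      by_cases hr : r.getD false = true
      · rw [if_pos hr, if_neg hor, if_pos hr]
      · rw [if_neg hr, if_neg hor, if_neg hr]
        have hloop :
            (PySem.List.pyRange 0 (level.length : Int) 1).foldl
              (fun temp i =>
                let x := PySem.List.slice level none (some i) ++
                  PySem.List.slice level (some (i+1)) none
                let temp := if x = PySem.List.sorted x (fun v => v) false then temp ++ [i] else temp
                if x = PySem.List.sorted x (fun v => v) true then temp ++ [i] else temp) []
            = (List.range level.length).foldl
              (fun temp i =>
                let near := i == 0 || i == level.length - 1
                let temp := if (prefFlags (fun a b => decide (a ≤ b)) level).getD i true &&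
                    ((prefFlags (fun a b => decide (b ≤ a)) level.reverse).reverse.getD (i+1) true) &&
                    (near || decide (level.getD (i-1) 0 ≤ level.getD (i+1) 0)) then temp ++ [(i : Int)] else temp
                if (prefFlags (fun a b => decide (b ≤ a)) level).getD i true &&
                    ((prefFlags (fun a b => decide (a ≤ b)) level.reverse).reverse.getD (i+1) true) &&
                    (near || decide (level.getD (i+1) 0 ≤ level.getD (i-1) 0)) then temp ++ [(i : Int)] else temp) [] := by
          rw [PySem.List.pyRange_one]
          simp only [sub_zero, Int.toNat_natCast, zero_add, List.foldl_map]
          apply PySem.List.foldl_congr_mem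
          intro acc k hkmem
          rw [List.mem_range] at hkmem
          have hx : PySem.List.slice level none (some (k : Int)) ++
              PySem.List.slice level (some ((k : Int)+1)) none = level.take k ++ level.drop (k+1) := by
            rw [PySem.List.slice_to_natCast]
            have hcast : ((k : Int) + 1) = (((k+1 : Nat)) : Int) := by push_cast; ring
            rw [hcast, PySem.List.slice_from_natCast]
          rw [hx]
          have hca : (level.take k ++ level.drop (k+1) =
              PySem.List.sorted (level.take k ++ level.drop (k+1)) (fun v => v) false) ↔
              (((prefFlags (fun a b => decide (a ≤ b)) level).getD k true &&
                ((prefFlags (fun a b => decide (b ≤ a)) level.reverse).reverse.getD (k+1) true) &&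
                ((k == 0 || k == level.length - 1) ||
                  decide (level.getD (k-1) 0 ≤ level.getD (k+1) 0))) = true) := by
            refine (eq_sorted_iff _).trans ?_
            refine Iff.trans ?_ (condB_iff (fun a b => decide (a ≤ b)) level k hkmem).symm
            exact List.IsChain.iff (fun a b => (decide_eq_true_iff).symm)
          have hcd : (level.take k ++ level.drop (k+1) =
              PySem.List.sorted (level.take k ++ level.drop (k+1)) (fun v => v) true) ↔
              (((prefFlags (fun a b => decide (b ≤ a)) level).getD k true &&
                ((prefFlags (fun a b => decide (a ≤ b)) level.reverse).reverse.getD (k+1) true) &&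
                ((k == 0 || k == level.length - 1) ||
                  decide (level.getD (k+1) 0 ≤ level.getD (k-1) 0))) = true) := by
            refine (eq_sorted_rev_iff _).trans ?_
            refine Iff.trans ?_ (condB_iff (fun a b => decide (b ≤ a)) level k hkmem).symm
            exact List.IsChain.iff (fun a b => (decide_eq_true_iff).symm)
          by_cases c2 : level.take k ++ level.drop (k+1) =
              PySem.List.sorted (level.take k ++ level.drop (k+1)) (fun v => v) true
          · rw [if_pos c2, if_pos (hcd.mp c2)]
            by_cases c1 : level.take k ++ level.drop (k+1) =
                PySem.List.sorted (level.take k ++ level.drop (k+1)) (fun v => v) false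
            · rw [if_pos c1, if_pos (hca.mp c1)]
            · rw [if_neg c1, if_neg (fun h => c1 (hca.mpr h))]
          · rw [if_neg c2, if_neg (fun h => c2 (hcd.mpr h))]
            by_cases c1 : level.take k ++ level.drop (k+1) =
                PySem.List.sorted (level.take k ++ level.drop (k+1)) (fun v => v) false
            · rw [if_pos c1, if_pos (hca.mp c1)]
            · rw [if_neg c1, if_neg (fun h => c1 (hca.mpr h))]
        rw [hloop]
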